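-- pv_equiv track=rewrite | github.com/Valiev/contests | adventofcode.com/2024/day09.py | fs_freespaces
-- ===== SOURCE A (Python) =====
-- def fs_freespaces(filesystem):
--     stack = []
--     for idx, elem in enumerate(filesystem):
--         if elem == '.':
--             stack.append(idx)
--             continue
--
--         if not stack:
--             continue
--
--         yield stack[0], len(stack)
--         while stack:
--             stack.pop()
--
--     if stack:
--         yield stack[0], len(stack)
-- ===== SOURCE B (Python) =====
-- def fs_freespaces(filesystem):
--     # Run-oriented two-pointer scan: skip over each maximal run of equal
--     # elements at once; yield (start, length) for runs of '.'.
--     n = len(filesystem)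
--     i = 0
--     while i < n:
--         j = i
--         while j < n and filesystem[j] == filesystem[i]:
--             j += 1
--         if filesystem[i] == '.':
--             yield (i, j - i)
--         i = j
-- ===== Notes on version B (the rewrite author's own statement) =====
-- stated objective: alternative
-- what changed: Replaced the per-character scan that accumulates every dot index on a stack with a run-oriented two-pointer scan that skips each maximal run of equal elements at once and emits (start, length) for dot runs directly.
import Mathlib
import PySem

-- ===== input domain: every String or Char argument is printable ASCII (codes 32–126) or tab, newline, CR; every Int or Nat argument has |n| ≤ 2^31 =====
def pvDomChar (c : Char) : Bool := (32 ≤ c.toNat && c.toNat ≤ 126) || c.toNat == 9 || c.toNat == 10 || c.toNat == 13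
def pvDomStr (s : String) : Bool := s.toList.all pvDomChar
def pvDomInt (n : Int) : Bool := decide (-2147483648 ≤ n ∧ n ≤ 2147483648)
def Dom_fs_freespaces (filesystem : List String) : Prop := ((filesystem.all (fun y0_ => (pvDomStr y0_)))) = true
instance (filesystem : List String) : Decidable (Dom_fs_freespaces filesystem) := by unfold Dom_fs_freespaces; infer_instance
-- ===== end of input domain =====

-- B replaces A's per-character dot-index stack with a run-oriented two-pointer scan (alternative decomposition, O(1) extra space); return value only (A is a generator, compared as the list of yielded pairs).

-- ===== PORT A =====
-- the for-loop over enumerate(filesystem), state = (stack of dot indices, yielded output)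
def fsA_loop (l : List (Int × String)) (stack : List Int) (out : List (Int × Int)) :
    List (Int × Int) × List Int :=
  match l with
  | [] => (out, stack)
  | (idx, elem) :: rest =>
    if elem = "." then fsA_loop rest (stack ++ [idx]) out
    else if stack.isEmpty then fsA_loop rest stack out
    else fsA_loop rest [] (out ++ [(stack.headD 0, (stack.length : Int))])

def fs_freespaces (filesystem : List String) : List (Int × Int) :=
  let r := fsA_loop (PySem.List.enumerate filesystem 0) [] []
  if r.2.isEmpty then r.1 else r.1 ++ [(r.2.headD 0, (r.2.length : Int))]

-- ===== PORT B =====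
-- inner while: j = i; while j < n and filesystem[j] == filesystem[i]: j += 1  (indices guarded in range, so getD is exact)
def runEnd (fs : List String) (i j : Nat) : Nat :=
  if _ : j < fs.length then
    if fs.getD j "" = fs.getD i "" then runEnd fs i (j + 1) else j
  else j
termination_by fs.length - j

-- termination facts the outer loop's recursion cites
theorem runEnd_ge (fs : List String) (i : Nat) : ∀ j, j ≤ runEnd fs i j := by
  intro j
  fun_induction runEnd fs i j with
  | case1 j h hv ih => omega
  | case2 j h hv => exact le_refl j
  | case3 j h => exact le_refl j

theorem runEnd_gt (fs : List String) (i : Nat) (h : i < fs.length) : i < runEnd fs i i := by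
  have := runEnd_ge fs i (i + 1)
  unfold runEnd
  simp [h]
  omega

-- outer while: run-at-a-time scan
def fsB_go (fs : List String) (i : Nat) : List (Int × Int) :=
  if h : i < fs.length then
    let j := runEnd fs i i
    (if fs.getD i "" = "." then [((i : Int), ((j - i : Nat) : Int))] else []) ++ fsB_go fs j
  else []
termination_by fs.length - i
decreasing_by
  have := runEnd_gt fs i h
  omega

def fs_freespaces_alt (filesystem : List String) : List (Int × Int) :=
  fsB_go filesystem 0

-- ===== PRECONDITION & SPEC =====
def Spec_fs_freespaces (filesystem : List String) (out : List (Int × Int)) : Prop := out = fs_freespaces_alt filesystem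
instance (filesystem : List String) (out : List (Int × Int)) : Decidable (Spec_fs_freespaces filesystem out) := by unfold Spec_fs_freespaces; infer_instance

-- ===== CLAIM (what is proved, stated in full; the proofs are below) =====
def Claim_equal_fs_freespaces : Prop := ∀ (filesystem : List String), Dom_fs_freespaces filesystem → Spec_fs_freespaces filesystem (fs_freespaces filesystem)

-- ===== LEMMAS AND PROOFS =====

-- canonical char-wise dot-run scanner both ports are reduced to
def dFlush (st : Option (Nat × Nat)) : List (Int × Int) :=
  match st with
  | none => []
  | some (s, c) => [((s : Int), (c : Int))]

def dPush (st : Option (Nat × Nat)) (i : Nat) : Option (Nat × Nat) :=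
  match st with
  | none => some (i, 1)
  | some (s, c) => some (s, c + 1)

def dgo (l : List String) (i : Nat) (st : Option (Nat × Nat)) : List (Int × Int) :=
  match l with
  | [] => dFlush st
  | x :: rest =>
    if x = "." then dgo rest (i + 1) (dPush st i)
    else dFlush st ++ dgo rest (i + 1) none

def stackOf (st : Option (Nat × Nat)) : List Int :=
  match st with
  | none => []
  | some (s, c) => (List.range' s c).map Int.ofNat

def fsA_fin (r : List (Int × Int) × List Int) : List (Int × Int) :=
  if r.2.isEmpty then r.1 else r.1 ++ [(r.2.headD 0, (r.2.length : Int))]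

theorem stackOf_push (st : Option (Nat × Nat)) (i : Nat)
    (hinv : ∀ s c, st = some (s, c) → 0 < c ∧ i = s + c) :
    stackOf (dPush st i) = stackOf st ++ [(i : Int)] := by
  match st with
  | none => simp [stackOf, dPush]
  | some (s, c) =>
    obtain ⟨hc, hi⟩ := hinv s c rfl
    simp [stackOf, dPush, List.range'_1_concat, hi]

theorem A_dgo (l : List String) : ∀ (i : Nat) (st : Option (Nat × Nat)) (out : List (Int × Int)),
    (∀ s c, st = some (s, c) → 0 < c ∧ i = s + c) →
    fsA_fin (fsA_loop (PySem.List.enumerate l (i : Int)) (stackOf st) out) = out ++ dgo l i st := by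
  induction l with
  | nil =>
    intro i st out hinv
    match st with
    | none => simp [PySem.List.enumerate, fsA_loop, fsA_fin, stackOf, dgo, dFlush]
    | some (s, c) =>
      obtain ⟨hc, _⟩ := hinv s c rfl
      obtain ⟨c', rfl⟩ := Nat.exists_eq_succ_of_ne_zero hc.ne'
      simp [PySem.List.enumerate, fsA_loop, fsA_fin, stackOf, dgo, dFlush, List.range'_succ]
  | cons x rest ih =>
    intro i st out hinv
    rw [PySem.List.enumerate_cons]
    by_cases hx : x = "."
    · have hpush : ∀ s c, dPush st i = some (s, c) → 0 < c ∧ i + 1 = s + c := by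
        intro s c hsc
        match st with
        | none => simp [dPush] at hsc; omega
        | some (s', c') =>
          obtain ⟨hc', hi'⟩ := hinv s' c' rfl
          simp [dPush] at hsc
          omega
      rw [show ((i : Int) + 1) = ((i + 1 : Nat) : Int) by push_cast; ring]
      simpa [fsA_loop, hx, dgo, stackOf_push st i hinv] using ih (i + 1) (dPush st i) out hpush
    · match st with
      | none =>
        rw [show ((i : Int) + 1) = ((i + 1 : Nat) : Int) by push_cast; ring]
        simpa [fsA_loop, hx, dgo, stackOf, dFlush] using
          ih (i + 1) none out (by intro s c h; simp at h)
      | some (s, c) =>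
        obtain ⟨hc, _⟩ := hinv s c rfl
        obtain ⟨c', rfl⟩ := Nat.exists_eq_succ_of_ne_zero hc.ne'
        rw [show ((i : Int) + 1) = ((i + 1 : Nat) : Int) by push_cast; ring]
        have hrec := ih (i + 1) none (out ++ [((s : Int), ((c' + 1 : Nat) : Int))])
          (by intro s c h; simp at h)
        simp only [stackOf, List.map_nil] at hrec
        simp only [stackOf, List.range'_succ, List.map_cons]
        simp only [fsA_loop, hx, if_false, List.isEmpty_cons, Bool.false_eq_true, if_false,
          List.headD_cons, List.length_cons, List.length_map, List.length_range']
        rw [show (((c' + 1 : Nat)) : Int) = ((c' : Nat) : Int) + 1 by push_cast; ring] at hrec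
        push_cast at hrec ⊢
        simp only [Int.ofNat_eq_natCast]
        rw [hrec]
        simp [dgo, hx, dFlush]

theorem drop_cons_of_lt (fs : List String) (i : Nat) (h : i < fs.length) :
    fs.drop i = fs.getD i "" :: fs.drop (i + 1) := by
  rw [List.getD_eq_getElem fs "" h]
  exact List.drop_eq_getElem_cons h

theorem runEnd_mem (fs : List String) (i : Nat) :
    ∀ j k, j ≤ k → k < runEnd fs i j → fs.getD k "" = fs.getD i "" ∧ k < fs.length := by
  intro j
  fun_induction runEnd fs i j with
  | case1 j h hv ih =>
    intro k hjk hk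
    rcases Nat.eq_or_lt_of_le hjk with rfl | hlt
    · exact ⟨hv, h⟩
    · exact ih k hlt hk
  | case2 j h hv => intro k hjk hk; omega
  | case3 j h => intro k hjk hk; omega

theorem runEnd_stop (fs : List String) (i : Nat) :
    ∀ j, fs.length ≤ runEnd fs i j ∨ fs.getD (runEnd fs i j) "" ≠ fs.getD i "" := by
  intro j
  fun_induction runEnd fs i j with
  | case1 j h hv ih => exact ih
  | case2 j h hv => right; exact hv
  | case3 j h => left; omega

theorem dgo_skip (fs : List String) (v : String) (hv : v ≠ ".") :
    ∀ (d i : Nat), (∀ k, i ≤ k → k < i + d → fs.getD k "" = v ∧ k < fs.length) →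
    dgo (fs.drop i) i none = dgo (fs.drop (i + d)) (i + d) none := by
  intro d
  induction d with
  | zero => intro i _; rfl
  | succ d ih =>
    intro i hrun
    obtain ⟨hval, hlen⟩ := hrun i (le_refl i) (by omega)
    rw [drop_cons_of_lt fs i hlen]
    simp only [dgo, hval, hv, if_false, dFlush, List.nil_append]
    rw [show i + (d + 1) = (i + 1) + d by omega]
    exact ih (i + 1) (by intro k h1 h2; exact hrun k (by omega) (by omega))

theorem dgo_dots (fs : List String) :
    ∀ (d i s c : Nat), (∀ k, i ≤ k → k < i + d → fs.getD k "" = "." ∧ k < fs.length) →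
    dgo (fs.drop i) i (some (s, c)) = dgo (fs.drop (i + d)) (i + d) (some (s, c + d)) := by
  intro d
  induction d with
  | zero => intro i s c _; rfl
  | succ d ih =>
    intro i s c hrun
    obtain ⟨hval, hlen⟩ := hrun i (le_refl i) (by omega)
    rw [drop_cons_of_lt fs i hlen]
    simp only [dgo, hval, if_true, dPush]
    rw [show i + (d + 1) = (i + 1) + d by omega, show c + (d + 1) = (c + 1) + d by omega]
    exact ih (i + 1) s (c + 1) (by intro k h1 h2; exact hrun k (by omega) (by omega))

theorem dgo_flush (fs : List String) (j s c : Nat)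
    (hstop : fs.length ≤ j ∨ fs.getD j "" ≠ ".") :
    dgo (fs.drop j) j (some (s, c)) = ((s : Int), (c : Int)) :: dgo (fs.drop j) j none := by
  by_cases hj : j < fs.length
  · have hne : fs.getD j "" ≠ "." := by
      rcases hstop with h | h
      · exact absurd h (Nat.not_le.mpr hj)
      · exact h
    rw [drop_cons_of_lt fs j hj]
    simp only [List.getD_eq_getElem?_getD] at hne
    simp [dgo, hne, dFlush]
  · rw [List.drop_of_length_le (by omega)]
    simp [dgo, dFlush]

theorem B_dgo (fs : List String) : ∀ i, fsB_go fs i = dgo (fs.drop i) i none := by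
  intro i
  fun_induction fsB_go fs i with
  | case1 i h j ih =>
    have hj : j = runEnd fs i i := rfl
    rw [hj] at *
    have hge : i < j := runEnd_gt fs i h
    have hmem := runEnd_mem fs i i
    have hstop := runEnd_stop fs i i
    by_cases hdot : fs.getD i "" = "."
    · rw [drop_cons_of_lt fs i h]
      simp only [dgo, hdot, if_true, dPush]
      have hrun : ∀ k, i + 1 ≤ k → k < (i + 1) + (j - (i + 1)) → fs.getD k "" = "." ∧ k < fs.length := by
        intro k h1 h2
        obtain ⟨hvk, hlk⟩ := hmem k (by omega) (by omega)
        exact ⟨by rw [hvk, hdot], hlk⟩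
      rw [dgo_dots fs (j - (i + 1)) (i + 1) i 1 hrun]
      have hjj : (i + 1) + (j - (i + 1)) = j := by omega
      rw [hjj]
      have hstop' : fs.length ≤ j ∨ fs.getD j "" ≠ "." := by
        rcases hstop with hh | hh
        · left; exact hh
        · right; rw [hdot] at hh; exact hh
      rw [dgo_flush fs j i (1 + (j - (i + 1))) hstop']
      rw [ih]
      simp only [hdot, if_true, List.singleton_append]
      congr 2
      omega
    · simp only [hdot, if_false, List.nil_append]
      rw [ih]
      have hrun : ∀ k, i ≤ k → k < i + (j - i) → fs.getD k "" = fs.getD i "" ∧ k < fs.length := by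
        intro k h1 h2; exact hmem k h1 (by omega)
      have := dgo_skip fs (fs.getD i "") hdot (j - i) i hrun
      rw [show i + (j - i) = j by omega] at this
      exact this.symm
  | case2 i h =>
    rw [List.drop_of_length_le (by omega)]
    rfl

-- ===== VERDICT (by name: the statement is the Claim_ definition above) =====
theorem fs_freespaces_spec : Claim_equal_fs_freespaces := by
  intro fs _
  unfold Spec_fs_freespaces fs_freespaces fs_freespaces_alt
  have hA := A_dgo fs 0 none [] (by intro s c h; simp at h)
  have hB := B_dgo fs 0
  simp only [List.drop_zero] at hB
  simp only [stackOf, List.nil_append] at hA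
  rw [show ((0 : Int)) = ((0 : Nat) : Int) by norm_num] at *
  rw [hB, ← hA]
  rfl
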